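-- pv_equiv track=rewrite | github.com/YuLinCheng0518/TEJ_AI_Service | intelligent_customer_service.py | tide_dataset
-- ===== SOURCE A (Python) =====
-- def tide_dataset(qa_dict):
--     test_qa, q_list = "", []
--     for qq, aa in zip(qa_dict['question'], qa_dict['answer']):
--         if len(qq) == 0:
--             test_qa = ""
--         else:
--             rag_qa = f"Q:{qq} \nA:{aa}\n"
--             test_qa += rag_qa
--             q_list.append(qq)
--     return test_qa, q_list
-- ===== SOURCE B (Python) =====
-- def _suffix(pairs):
--     # longest suffix of pairs whose questions are all non-empty
--     kept = []
--     for q, a in reversed(pairs):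
--         if not q:
--             break
--         kept.append((q, a))
--     kept.reverse()
--     return kept
--
--
-- def tide_dataset(qa_dict):
--     pairs = list(zip(qa_dict['question'], qa_dict['answer']))
--     q_list = [q for q, _ in pairs if q]
--     test_qa = "".join(f"Q:{q} \nA:{a}\n" for q, a in _suffix(pairs))
--     return test_qa, q_list
-- ===== Notes on version B (the rewrite author's own statement) =====
-- stated objective: alternative
-- what changed: A fuses everything into one loop that resets the accumulated string on each empty question; B makes three separate passes: collect all non-empty questions, find the suffix after the last empty question by a reverse scan, then join only that suffix.
import Mathlib
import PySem

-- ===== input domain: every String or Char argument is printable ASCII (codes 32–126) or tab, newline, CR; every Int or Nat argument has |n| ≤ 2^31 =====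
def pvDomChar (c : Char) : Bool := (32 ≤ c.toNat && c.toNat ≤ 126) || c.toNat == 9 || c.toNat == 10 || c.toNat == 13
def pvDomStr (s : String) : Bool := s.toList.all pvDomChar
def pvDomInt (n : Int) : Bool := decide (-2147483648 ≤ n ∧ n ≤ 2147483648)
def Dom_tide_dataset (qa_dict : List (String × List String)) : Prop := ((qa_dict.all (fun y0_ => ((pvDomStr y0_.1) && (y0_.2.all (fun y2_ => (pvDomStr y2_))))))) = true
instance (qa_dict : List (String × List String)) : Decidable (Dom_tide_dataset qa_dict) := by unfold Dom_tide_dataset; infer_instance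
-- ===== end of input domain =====

-- B splits A's single fused loop into three passes (collect all non-empty questions; find the
-- suffix after the last empty question by a reverse scan; join only that suffix) — objective: alternative decomposition, not faster.

-- ===== PORT A =====
def tide_dataset (qa_dict : List (String × List String)) : String × List String :=
  match (PySem.Dict.mk qa_dict).get? "question", (PySem.Dict.mk qa_dict).get? "answer" with
  | some qs, some ans =>
      (qs.zip ans).foldl
        (fun st p =>
          if PySem.Str.len p.1 == 0 then ("", st.2)
          else (st.1 ++ ("Q:" ++ p.1 ++ " \nA:" ++ p.2 ++ "\n"), st.2 ++ [p.1]))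
        ("", [])
  | _, _ => ("", [])  -- unreachable under Pre_ (Python raises KeyError)

-- ===== PORT B =====
-- port of _suffix's reversed-scan loop: take pairs (from the reversed list) until an empty question
def pvTakeRev : List (String × String) → List (String × String)
  | [] => []
  | p :: rest => if p.1 == "" then [] else p :: pvTakeRev rest

-- the f-string f"Q:{q} \nA:{a}\n"
def pvFmt (p : String × String) : String := "Q:" ++ p.1 ++ " \nA:" ++ p.2 ++ "\n"

def tide_dataset_alt (qa_dict : List (String × List String)) : String × List String :=
  match (PySem.Dict.mk qa_dict).get? "question" with
  | none => ("", [])  -- unreachable under Pre_ (Python raises KeyError)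
  | some qs =>
    match (PySem.Dict.mk qa_dict).get? "answer" with
    | none => ("", [])  -- unreachable under Pre_ (Python raises KeyError)
    | some ans =>
      let pairs := qs.zip ans
      let q_list := (pairs.filter (fun p => !(p.1 == ""))).map (fun p => p.1)
      let test_qa := PySem.Str.join "" (((pvTakeRev pairs.reverse).reverse).map pvFmt)
      (test_qa, q_list)

-- ===== PRECONDITION & SPEC =====
-- Pre_ excludes exactly the inputs where Python A raises KeyError: a missing 'question' or 'answer' key.
def Pre_tide_dataset (qa_dict : List (String × List String)) : Prop :=
  ((PySem.Dict.mk qa_dict).get? "question").isSome ∧ ((PySem.Dict.mk qa_dict).get? "answer").isSome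
instance (qa_dict : List (String × List String)) : Decidable (Pre_tide_dataset qa_dict) := by
  unfold Pre_tide_dataset; infer_instance
def pvWitness_tide_dataset : (List (String × List String)) :=
  [("question", ["q1", "", "q2"]), ("answer", ["a1", "a2", "a3"])]

def Spec_tide_dataset (qa_dict : List (String × List String)) (out : String × List String) : Prop := out = tide_dataset_alt qa_dict
instance (qa_dict : List (String × List String)) (out : String × List String) : Decidable (Spec_tide_dataset qa_dict out) := by unfold Spec_tide_dataset; infer_instance

-- ===== CLAIM (what is proved, stated in full; the proofs are below) =====
def Claim_equal_tide_dataset : Prop := ∀ (qa_dict : List (String × List String)), Dom_tide_dataset qa_dict → Pre_tide_dataset qa_dict → Spec_tide_dataset qa_dict (tide_dataset qa_dict)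

-- ===== LEMMAS AND PROOFS =====

theorem pv_flatten_intersperse_nil (l : List (List Char)) :
    (List.intersperse ([] : List Char) l).flatten = l.flatten := by
  induction l with
  | nil => rfl
  | cons x xs ih => cases xs <;> simp_all [List.intersperse]

theorem pv_join_nil : PySem.Str.join "" ([] : List String) = "" := rfl

theorem pv_join_cons (x : String) (l : List String) :
    PySem.Str.join "" (x :: l) = x ++ PySem.Str.join "" l := by
  simp [PySem.Str.join, PySem.Chars.join, List.intercalate, pv_flatten_intersperse_nil,
    String.ofList_append]

theorem pv_takeRev_all (xs : List (String × String)) (h : xs.all (fun p => !(p.1 == ""))) :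
    pvTakeRev xs = xs := by
  induction xs with
  | nil => rfl
  | cons p rest ih =>
    simp only [List.all_cons, Bool.and_eq_true] at h
    simp [pvTakeRev, ih h.2, show ¬(p.1 = "") by simpa using h.1]

theorem pv_takeRev_append (xs ys : List (String × String)) :
    pvTakeRev (xs ++ ys) =
      if xs.all (fun p => !(p.1 == "")) then xs ++ pvTakeRev ys else pvTakeRev xs := by
  induction xs with
  | nil => simp
  | cons p rest ih =>
    by_cases hp : p.1 = ""
    · simp [pvTakeRev, hp]
    · simp only [List.cons_append, pvTakeRev]
      rw [ih]
      by_cases hr : rest.all (fun p => !(p.1 == "")) = true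
      · simp [hp, hr]
      · simp [hp, hr]

-- B's test_qa as a function of the pair list
def pvTQ (ps : List (String × String)) : String :=
  PySem.Str.join "" (((pvTakeRev ps.reverse).reverse).map pvFmt)

-- B's q_list as a function of the pair list
def pvQL (ps : List (String × String)) : List String :=
  (ps.filter (fun p => !(p.1 == ""))).map (fun p => p.1)

theorem pv_tq_cons_empty (p : String × String) (ps : List (String × String)) (hp : p.1 = "") :
    pvTQ (p :: ps) = pvTQ ps := by
  unfold pvTQ
  simp only [List.reverse_cons, pv_takeRev_append]
  split_ifs with h
  · rw [pv_takeRev_all _ h]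
    simp [pvTakeRev, hp]
  · rfl

theorem pv_tq_cons_nonempty (p : String × String) (ps : List (String × String)) (hp : ¬ p.1 = "") :
    pvTQ (p :: ps) =
      if ps.any (fun q => q.1 == "") then pvTQ ps else pvFmt p ++ pvTQ ps := by
  unfold pvTQ
  simp only [List.reverse_cons, pv_takeRev_append]
  by_cases h : ps.any (fun q => q.1 == "") = true
  · have hall : (ps.reverse.all fun q => !(q.1 == "")) = false := by
      simp [List.any_reverse, List.all_eq_not_any_not, h]
    simp [hall, h]
  · have hb : (ps.any fun q => q.1 == "") = false := Bool.eq_false_iff.mpr h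
    have hall : (ps.reverse.all fun q => !(q.1 == "")) = true := by
      simp [List.any_reverse, List.all_eq_not_any_not, hb]
    rw [if_pos hall, hb]
    simp [pvTakeRev, hp, pv_takeRev_all ps.reverse hall, pv_join_cons]

-- main invariant: A's fold from any accumulator, expressed through B's pieces
theorem pv_fold_eq (ps : List (String × String)) (s : String) (l : List String) :
    ps.foldl
      (fun st p =>
        if PySem.Str.len p.1 == 0 then ("", st.2)
        else (st.1 ++ ("Q:" ++ p.1 ++ " \nA:" ++ p.2 ++ "\n"), st.2 ++ [p.1]))
      (s, l)
    = ((if ps.any (fun q => q.1 == "") then pvTQ ps else s ++ pvTQ ps), l ++ pvQL ps) := by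
  induction ps generalizing s l with
  | nil => simp [pvTQ, pvTakeRev, pv_join_nil, pvQL]
  | cons p rest ih =>
    rw [List.foldl_cons]
    by_cases hp : p.1 = ""
    · rw [if_pos (by simp [PySem.Str.len_eq, hp])]
      rw [ih, pv_tq_cons_empty p rest hp]
      simp [hp, pvQL]
    · rw [if_neg (by simp [PySem.Str.len_eq, hp])]
      rw [ih, pv_tq_cons_nonempty p rest hp]
      by_cases h : rest.any (fun q => q.1 == "") = true
      · simp [hp, h, pvQL, pvFmt]
      · simp [hp, h, pvQL, pvFmt, String.append_assoc]

-- ===== VERDICT (by name: the statement is the Claim_ definition above) =====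
theorem tide_dataset_spec : Claim_equal_tide_dataset := by
  intro qa_dict _ hpre
  unfold Spec_tide_dataset tide_dataset tide_dataset_alt
  obtain ⟨hq, ha⟩ := hpre
  obtain ⟨qs, hqs⟩ := Option.isSome_iff_exists.mp hq
  obtain ⟨ans, hans⟩ := Option.isSome_iff_exists.mp ha
  rw [hqs, hans]
  dsimp only
  rw [pv_fold_eq]
  by_cases h : (qs.zip ans).any (fun q => q.1 == "") = true <;>
    simp [h, pvTQ, pvQL]
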